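-- pv_equiv track=rewrite | github.com/Jorextror/Python | 2n 2021 22/1 matricula/moduls_fets/img.py | img
-- ===== SOURCE A (Python) =====
-- def img(matrix,model='DISCOVER'):
--     bn=False
--     gris=False
--     for i in matrix:
--         for j in i:
--             if j == (255,255,255) or j == (0,0,0):
--                 bn=True
--             elif j[0]==j[1] and j[1]==j[2]:
--                 gris=True
--             else:
--                 return "RGB",matrix
--
--     if gris:
--         return "1",matrix
--     elif bn and gris:
--         return "L",matrix
-- ===== SOURCE B (Python) =====
-- def _is_bw(p):
--     return p == (255, 255, 255) or p == (0, 0, 0)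
--
-- def _is_gray(p):
--     return p[0] == p[1] and p[1] == p[2]
--
-- def img(matrix, model='DISCOVER'):
--     pixels = [p for row in matrix for p in row]
--     if any(not _is_bw(p) and not _is_gray(p) for p in pixels):
--         return "RGB", matrix
--     if any(not _is_bw(p) and _is_gray(p) for p in pixels):
--         return "1", matrix
--     return None
-- ===== Notes on version B (the rewrite author's own statement) =====
-- stated objective: idiomatic
-- what changed: Replaces the stateful nested loop with boolean flags by a flatten plus two short-circuiting any() existential scans (RGB pixel first, then a non-black/white gray pixel), dropping the unreachable 'L' branch and the bn flag entirely.
import Mathlib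
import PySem

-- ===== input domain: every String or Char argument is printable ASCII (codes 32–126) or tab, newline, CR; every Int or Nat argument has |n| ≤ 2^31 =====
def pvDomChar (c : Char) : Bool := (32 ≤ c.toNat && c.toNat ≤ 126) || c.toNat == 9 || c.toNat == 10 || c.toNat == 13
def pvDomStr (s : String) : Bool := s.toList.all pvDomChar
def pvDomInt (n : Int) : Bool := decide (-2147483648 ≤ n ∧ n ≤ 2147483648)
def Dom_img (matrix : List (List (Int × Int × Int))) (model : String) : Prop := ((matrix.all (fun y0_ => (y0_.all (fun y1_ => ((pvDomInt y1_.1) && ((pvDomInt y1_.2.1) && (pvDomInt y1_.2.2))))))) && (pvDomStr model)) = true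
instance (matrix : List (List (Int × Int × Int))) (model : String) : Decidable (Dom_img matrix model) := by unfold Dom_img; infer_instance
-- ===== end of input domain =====

-- B replaces A's stateful nested loop (bn/gris flags, early return) with two short-circuiting
-- existential scans over the flattened pixel list (objective: more idiomatic).

-- ===== PORT A =====
-- inner 'for j in i' loop: returns none to signal the early `return "RGB",matrix`,
-- otherwise the updated (bn, gris) flags
def imgRowA : List (Int × Int × Int) → Bool → Bool → Option (Bool × Bool)
  | [], bn, gris => some (bn, gris)
  | j :: rest, bn, gris =>
    if j = (255, 255, 255) ∨ j = (0, 0, 0) then imgRowA rest true gris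
    else if j.1 = j.2.1 ∧ j.2.1 = j.2.2 then imgRowA rest bn true
    else none

-- outer 'for i in matrix' loop
def imgRowsA : List (List (Int × Int × Int)) → Bool → Bool → Option (Bool × Bool)
  | [], bn, gris => some (bn, gris)
  | i :: rest, bn, gris =>
    match imgRowA i bn gris with
    | none => none
    | some (bn', gris') => imgRowsA rest bn' gris'

def img (matrix : List (List (Int × Int × Int))) (model : String) : Option (String × (List (List (Int × Int × Int)))) :=
  match imgRowsA matrix false false with
  | none => some ("RGB", matrix)
  | some (bn, gris) =>
    if gris then some ("1", matrix)
    else if bn ∧ gris then some ("L", matrix)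
    else none

-- ===== PORT B =====
def isBW (p : Int × Int × Int) : Bool := p = (255, 255, 255) ∨ p = (0, 0, 0)

def isGray (p : Int × Int × Int) : Bool := p.1 = p.2.1 ∧ p.2.1 = p.2.2

def img_alt (matrix : List (List (Int × Int × Int))) (model : String) : Option (String × (List (List (Int × Int × Int)))) :=
  let pixels := matrix.flatMap (fun row => row)
  if pixels.any (fun p => !isBW p && !isGray p) then some ("RGB", matrix)
  else if pixels.any (fun p => !isBW p && isGray p) then some ("1", matrix)
  else none

-- ===== PRECONDITION & SPEC =====
def Spec_img (matrix : List (List (Int × Int × Int))) (model : String) (out : Option (String × (List (List (Int × Int × Int))))) : Prop := out = img_alt matrix model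
instance (matrix : List (List (Int × Int × Int))) (model : String) (out : Option (String × (List (List (Int × Int × Int))))) : Decidable (Spec_img matrix model out) := by unfold Spec_img; infer_instance

-- ===== CLAIM (what is proved, stated in full; the proofs are below) =====
def Claim_equal_img : Prop := ∀ (matrix : List (List (Int × Int × Int))) (model : String), Dom_img matrix model → Spec_img matrix model (img matrix model)

-- ===== LEMMAS AND PROOFS =====

theorem imgRowA_char (l : List (Int × Int × Int)) (bn gris : Bool) :
    imgRowA l bn gris =
      if l.any (fun p => !isBW p && !isGray p) then none
      else some (bn || l.any isBW, gris || l.any (fun p => !isBW p && isGray p)) := by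
  induction l generalizing bn gris with
  | nil => simp [imgRowA]
  | cons j rest ih =>
    simp only [imgRowA, List.any_cons]
    by_cases hbw : j = (255, 255, 255) ∨ j = (0, 0, 0)
    · have hb : isBW j = true := by simp [isBW, hbw]
      rw [if_pos hbw, ih]
      simp only [hb, Bool.not_true, Bool.false_and, Bool.false_or, Bool.true_or, Bool.or_true]
    · have hb : isBW j = false := by simp [isBW]; tauto
      by_cases hg : j.1 = j.2.1 ∧ j.2.1 = j.2.2
      · have hgb : isGray j = true := by simp [isGray, hg]
        rw [if_neg hbw, if_pos hg, ih]
        simp only [hb, hgb, Bool.not_true, Bool.not_false, Bool.true_and, Bool.and_false,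
          Bool.false_or, Bool.true_or, Bool.or_true]
      · have hgb : isGray j = false := by simp [isGray]; tauto
        rw [if_neg hbw, if_neg hg]
        simp only [hb, hgb, Bool.not_false, Bool.true_and, Bool.true_or]
        simp

theorem imgRowsA_char (m : List (List (Int × Int × Int))) (bn gris : Bool) :
    imgRowsA m bn gris =
      if (m.flatMap (fun row => row)).any (fun p => !isBW p && !isGray p) then none
      else some (bn || (m.flatMap (fun row => row)).any isBW,
                 gris || (m.flatMap (fun row => row)).any (fun p => !isBW p && isGray p)) := by
  induction m generalizing bn gris with
  | nil => simp [imgRowsA]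
  | cons i rest ih =>
    simp only [imgRowsA, imgRowA_char, List.flatMap_cons, List.any_append]
    cases h : i.any (fun p => !isBW p && !isGray p) with
    | true => simp
    | false =>
      simp only [Bool.false_or, Bool.false_eq_true, if_false]
      rw [ih]
      simp [Bool.or_assoc]

-- ===== VERDICT (by name: the statement is the Claim_ definition above) =====
theorem img_spec : Claim_equal_img := by
  intro matrix model _
  unfold Spec_img img img_alt
  rw [imgRowsA_char]
  by_cases h : (matrix.flatMap (fun row => row)).any (fun p => !isBW p && !isGray p) = true
  · simp only [h]
    simp
  · simp only [Bool.not_eq_true] at h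
    simp only [h, Bool.false_eq_true, if_false, Bool.false_or]
    by_cases hg : (matrix.flatMap (fun row => row)).any (fun p => !isBW p && isGray p) = true
    · simp only [hg]
      simp
    · simp only [Bool.not_eq_true] at hg
      simp only [hg, Bool.false_eq_true, if_false]
      simp
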